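-- pv_equiv track=rewrite | github.com/JiaTianyu20031016/CoDPO | scripts/utils/draw_curves.py | infer_metrics
-- ===== SOURCE A (Python) =====
-- from typing import Dict, Iterable, List, Sequence, Tuple
--
-- def infer_metrics(log_history: Sequence[Dict], explicit: Iterable[str] | None) -> List[str]:
-- 	"""Pick metrics to plot.
--
-- 	If metrics are provided explicitly, use them. Otherwise, prefer a small
-- 	default set common to DPO runs and fall back to keys containing accuracy,
-- 	margin, or loss.
-- 	"""
--
-- 	if explicit:
-- 		return list(dict.fromkeys(explicit))
--
-- 	default_candidates = ["rewards/accuracies", "rewards/margins", "loss"]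
-- 	present = {m for m in default_candidates if any(m in rec or f"eval_{m}" in rec for rec in log_history)}
-- 	if present:
-- 		return sorted(present)
--
-- 	keywords = ("accuracy", "accuracies", "margin", "margins", "loss")
-- 	inferred = set()
-- 	for rec in log_history:
-- 		for key in rec:
-- 			base = key[5:] if key.startswith("eval_") else key
-- 			if any(k in base for k in keywords):
-- 				inferred.add(base)
-- 	if not inferred:
-- 		raise ValueError("Could not infer metrics to plot; please pass --metrics explicitly.")
-- 	return sorted(inferred)
-- ===== SOURCE B (Python) =====
-- from typing import Dict, Iterable, List, Sequence
--
-- def infer_metrics(log_history: Sequence[Dict], explicit: Iterable[str] | None) -> List[str]: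
-- 	"""Pick metrics to plot: one pass builds the set of eval_-stripped keys,
-- 	then both phases are plain set filters over it."""
--
-- 	if explicit:
-- 		return list(dict.fromkeys(explicit))
--
-- 	base_keys = set()
-- 	for rec in log_history:
-- 		for key in rec:
-- 			base_keys.add(key[5:] if key.startswith("eval_") else key)
--
-- 	present = {c for c in ("rewards/accuracies", "rewards/margins", "loss") if c in base_keys}
-- 	if present:
-- 		return sorted(present)
--
-- 	keywords = ("accuracy", "accuracies", "margin", "margins", "loss")
-- 	inferred = {b for b in base_keys if any(k in b for k in keywords)}
-- 	if not inferred: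
-- 		raise ValueError("Could not infer metrics to plot; please pass --metrics explicitly.")
-- 	return sorted(inferred)
-- ===== Notes on version B (the rewrite author's own statement) =====
-- stated objective: simpler
-- what changed: Instead of A's candidate scan that equality-tests every raw key against m and 'eval_'+m and a second keyword fold that re-strips every key, B makes one pass building the set of eval_-stripped keys and both phases become plain filters over that set.
import Mathlib
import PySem

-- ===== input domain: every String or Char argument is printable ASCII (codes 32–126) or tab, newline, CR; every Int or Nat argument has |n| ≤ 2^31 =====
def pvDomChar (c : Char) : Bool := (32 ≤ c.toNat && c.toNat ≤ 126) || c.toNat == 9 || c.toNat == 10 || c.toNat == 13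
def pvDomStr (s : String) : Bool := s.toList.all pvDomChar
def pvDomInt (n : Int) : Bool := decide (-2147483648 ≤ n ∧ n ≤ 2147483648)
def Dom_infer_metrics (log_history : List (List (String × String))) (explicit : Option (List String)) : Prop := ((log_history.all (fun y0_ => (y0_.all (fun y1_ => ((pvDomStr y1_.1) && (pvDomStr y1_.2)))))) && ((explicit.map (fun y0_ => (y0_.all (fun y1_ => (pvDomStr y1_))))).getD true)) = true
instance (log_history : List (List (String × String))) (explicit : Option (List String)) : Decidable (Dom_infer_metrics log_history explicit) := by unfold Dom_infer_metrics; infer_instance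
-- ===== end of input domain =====

-- B replaces A's two separate scans (a candidate scan testing raw keys by equality, then a
-- keyword fold re-stripping every key) by ONE pass building the set of eval_-stripped keys,
-- over which both phases become plain set filters (objective: simpler).

-- ===== PORT A =====
-- shared literal data of the Python source
def pvCandidates : List String := ["rewards/accuracies", "rewards/margins", "loss"]
def pvKeywords : List String := ["accuracy", "accuracies", "margin", "margins", "loss"]
-- f"eval_{m}" (string concatenation; exact)
def pvEval (m : String) : String := String.ofList ('e' :: 'v' :: 'a' :: 'l' :: '_' :: m.toList)
-- base = key[5:] if key.startswith("eval_") else key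
def pvStrip (k : String) : String :=
  if PySem.Str.startswith k "eval_" then PySem.Str.slice k (some 5) none else k
-- any(k in base for k in keywords)
def pvKw (b : String) : Bool := pvKeywords.any (fun k => PySem.Str.isIn k b)

def infer_metrics (log_history : List (List (String × String))) (explicit : Option (List String)) : List String :=
  match explicit with
  | some (x :: xs) => PySem.List.dedup (x :: xs)   -- list(dict.fromkeys(explicit))
  | _ =>
    -- present = {m for m in default_candidates if any(m in rec or f"eval_{m}" in rec for rec in log_history)}
    let present : PySem.Set String :=
      PySem.Set.ofList (pvCandidates.filter (fun m =>
        log_history.any (fun rec => rec.any (fun kv => kv.1 == m || kv.1 == pvEval m))))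
    if present ≠ [] then PySem.List.sorted present (fun x => x) false
    else
      -- inferred = set(); for rec …: for key …: if any(k in base …): inferred.add(base)
      let inferred : PySem.Set String :=
        log_history.foldl (fun s rec =>
          rec.foldl (fun s kv =>
            let base := pvStrip kv.1
            if pvKw base then PySem.Set.add s base else s) s) PySem.Set.empty
      if inferred = [] then []   -- Python raises ValueError here; excluded by Pre_
      else PySem.List.sorted inferred (fun x => x) false

-- ===== PORT B =====
-- B-side copies of the literal data and the strip/keyword helpers
def pvCandidatesB : List String := ["rewards/accuracies", "rewards/margins", "loss"]
def pvKeywordsB : List String := ["accuracy", "accuracies", "margin", "margins", "loss"]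
def pvStripB (k : String) : String :=
  if PySem.Str.startswith k "eval_" then PySem.Str.slice k (some 5) none else k
def pvKwB (b : String) : Bool := pvKeywordsB.any (fun k => PySem.Str.isIn k b)

def infer_metrics_alt (log_history : List (List (String × String))) (explicit : Option (List String)) : List String :=
  if (explicit.getD []).isEmpty then   -- 'if explicit:' is false: None or empty
    -- one pass: base_keys = set of eval_-stripped keys of all records
    let baseKeys : PySem.Set String :=
      log_history.foldl (fun s rec =>
        rec.foldl (fun s kv => PySem.Set.add s (pvStripB kv.1)) s) PySem.Set.empty
    -- present = {c for c in candidates if c in base_keys}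
    let present : PySem.Set String :=
      PySem.Set.ofList (pvCandidatesB.filter (fun c => PySem.Set.contains baseKeys c))
    if present ≠ [] then PySem.List.sorted present (fun x => x) false
    else
      -- inferred = {b for b in base_keys if any(k in b for k in keywords)}
      let inferred : PySem.Set String := PySem.Set.ofList (List.filter pvKwB baseKeys)
      if inferred = [] then []   -- Python raises ValueError here; excluded by Pre_
      else PySem.List.sorted inferred (fun x => x) false
  else PySem.List.dedup (explicit.getD [])   -- list(dict.fromkeys(explicit))

-- ===== PRECONDITION & SPEC =====
-- Pre_ excludes exactly the inputs where the Python A raises ValueError (B raises the same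
-- ValueError there): explicit empty/None and no key whose eval_-stripped form contains a keyword.
def Pre_infer_metrics (log_history : List (List (String × String))) (explicit : Option (List String)) : Prop :=
  (explicit.getD [] ≠ []) ∨
  ∃ rec ∈ log_history, ∃ kv ∈ rec,
    (["accuracy", "accuracies", "margin", "margins", "loss"].any (fun k => PySem.Str.isIn k
      (if PySem.Str.startswith kv.1 "eval_" then PySem.Str.slice kv.1 (some 5) none else kv.1))) = true
instance (log_history : List (List (String × String))) (explicit : Option (List String)) : Decidable (Pre_infer_metrics log_history explicit) := by unfold Pre_infer_metrics; infer_instance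

def pvWitness_infer_metrics : (List (List (String × String))) × Option (List String) :=
  ([[("eval_loss", "1")]], none)

def Spec_infer_metrics (log_history : List (List (String × String))) (explicit : Option (List String)) (out : List String) : Prop := out = infer_metrics_alt log_history explicit
instance (log_history : List (List (String × String))) (explicit : Option (List String)) (out : List String) : Decidable (Spec_infer_metrics log_history explicit out) := by unfold Spec_infer_metrics; infer_instance

-- ===== CLAIM (what is proved, stated in full; the proofs are below) =====
def Claim_equal_infer_metrics : Prop := ∀ (log_history : List (List (String × String))) (explicit : Option (List String)), Dom_infer_metrics log_history explicit → Pre_infer_metrics log_history explicit → Spec_infer_metrics log_history explicit (infer_metrics log_history explicit)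

-- ===== LEMMAS AND PROOFS =====

-- strip characterization: when m itself does not start with "eval_",
-- A's raw-key test (key == m or key == "eval_"+m) equals B's stripped-key test
theorem pvStrip_eq_iff (k m : String) (hm : PySem.Str.startswith m "eval_" = false) :
    (k == m || k == pvEval m) = true ↔ pvStrip k = m := by
  unfold pvStrip
  have hme : ¬ ("eval_".toList <+: m.toList) := by
    intro h; rw [← PySem.Chars.startswith_iff] at h; simp at h hm; rw [hm] at h; cases h
  by_cases hk : PySem.Str.startswith k "eval_" = true
  · rw [if_pos hk]
    have hpre : "eval_".toList <+: k.toList := by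
      rw [← PySem.Chars.startswith_iff]; simpa using hk
    obtain ⟨t, ht⟩ := hpre
    have hkl : k.toList = 'e'::'v'::'a'::'l'::'_'::t := by rw [← ht]; rfl
    have hslice : (PySem.Str.slice k (some 5) none).toList = t := by
      have : (PySem.Str.slice k (some 5) none).toList = k.toList.drop 5 := by
        simp; simpa using PySem.List.slice_from_natCast k.toList 5
      rw [this, hkl]; rfl
    constructor
    · intro h
      rcases Bool.or_eq_true _ _ |>.mp h with h | h
      · exfalso; apply hme
        have : k = m := by simpa using h
        rw [← this, hkl]; exact ⟨t, rfl⟩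
      · have : k = pvEval m := by simpa using h
        apply String.toList_inj.mp
        rw [hslice]
        have := congrArg String.toList this
        rw [hkl] at this; simp [pvEval] at this
        simp [this]
    · intro h
      apply Bool.or_eq_true _ _ |>.mpr; right
      have : t = m.toList := by rw [← hslice, h]
      simp [pvEval]
      apply String.toList_inj.mp
      rw [hkl, this]; simp
  · rw [if_neg hk]
    simp at hk
    constructor
    · intro h
      rcases Bool.or_eq_true _ _ |>.mp h with h | h
      · simpa using h
      · exfalso
        have hkt : k.toList = 'e'::'v'::'a'::'l'::'_'::m.toList := by
          have : k = pvEval m := by simpa using h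
          simpa [pvEval] using congrArg String.toList this
        have hsw : PySem.Chars.startswith k.toList ['e','v','a','l','_'] = true := by
          rw [PySem.Chars.startswith_iff, hkt]; exact ⟨m.toList, rfl⟩
        rw [hk] at hsw; cases hsw
    · intro h; simp [h]

-- membership / nodup of B's base_keys fold
theorem mem_baseInner (rec : List (String × String)) (s : PySem.Set String) (y : String) :
    y ∈ rec.foldl (fun s kv => PySem.Set.add s (pvStrip kv.1)) s ↔
      y ∈ s ∨ ∃ kv ∈ rec, pvStrip kv.1 = y := by
  induction rec generalizing s with
  | nil => simp
  | cons kv t ih => simp [List.foldl_cons, ih, PySem.Set.mem_add]; tauto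

theorem mem_baseFold (lh : List (List (String × String))) (s : PySem.Set String) (y : String) :
    y ∈ lh.foldl (fun s rec => rec.foldl (fun s kv => PySem.Set.add s (pvStrip kv.1)) s) s ↔
      y ∈ s ∨ ∃ rec ∈ lh, ∃ kv ∈ rec, pvStrip kv.1 = y := by
  induction lh generalizing s with
  | nil => simp
  | cons rec t ih => simp [List.foldl_cons, ih, mem_baseInner]; exact or_assoc

-- membership / nodup of A's conditional fold
theorem mem_condInner (rec : List (String × String)) (s : PySem.Set String) (y : String) :
    y ∈ rec.foldl (fun s kv =>
        let base := pvStrip kv.1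
        if pvKw base then PySem.Set.add s base else s) s ↔
      y ∈ s ∨ ∃ kv ∈ rec, pvStrip kv.1 = y ∧ pvKw y = true := by
  induction rec generalizing s with
  | nil => simp
  | cons kv t ih =>
    simp only [List.foldl_cons, ih]
    by_cases h : pvKw (pvStrip kv.1) = true
    · simp [h, PySem.Set.mem_add]
      constructor
      · rintro ((hy | rfl) | hy)
        · exact Or.inl hy
        · exact Or.inr (Or.inl ⟨rfl, h⟩)
        · exact Or.inr (Or.inr hy)
      · rintro (hy | (⟨rfl, _⟩ | hy))
        · exact Or.inl (Or.inl hy)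
        · exact Or.inl (Or.inr rfl)
        · exact Or.inr hy
    · simp [h]
      constructor
      · rintro (hy | hy)
        · exact Or.inl hy
        · exact Or.inr (Or.inr hy)
      · rintro (hy | (⟨heq, hkw⟩ | hy))
        · exact Or.inl hy
        · exact absurd (heq ▸ hkw) h
        · exact Or.inr hy

theorem mem_condFold (lh : List (List (String × String))) (s : PySem.Set String) (y : String) :
    y ∈ lh.foldl (fun s rec => rec.foldl (fun s kv =>
        let base := pvStrip kv.1
        if pvKw base then PySem.Set.add s base else s) s) s ↔
      y ∈ s ∨ ∃ rec ∈ lh, ∃ kv ∈ rec, pvStrip kv.1 = y ∧ pvKw y = true := by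
  induction lh generalizing s with
  | nil => simp
  | cons rec t ih => simp [List.foldl_cons, ih, mem_condInner]; exact or_assoc

theorem nodup_condInner (rec : List (String × String)) (s : PySem.Set String) (hs : s.Nodup) :
    (rec.foldl (fun s kv =>
        let base := pvStrip kv.1
        if pvKw base then PySem.Set.add s base else s) s).Nodup := by
  induction rec generalizing s with
  | nil => exact hs
  | cons kv t ih =>
    simp only [List.foldl_cons]
    by_cases h : pvKw (pvStrip kv.1) = true
    · simp only [if_pos h]; exact ih _ (PySem.Set.nodup_add _ _ hs)
    · simp only [if_neg h]; exact ih _ hs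

theorem nodup_condFold (lh : List (List (String × String))) (s : PySem.Set String) (hs : s.Nodup) :
    (lh.foldl (fun s rec => rec.foldl (fun s kv =>
        let base := pvStrip kv.1
        if pvKw base then PySem.Set.add s base else s) s) s).Nodup := by
  induction lh generalizing s with
  | nil => exact hs
  | cons rec t ih => exact ih _ (nodup_condInner rec s hs)

-- the main body equality on falsy explicit, under the keyword-match precondition
theorem body_eq (lh : List (List (String × String)))
    (hpre2 : ∃ rec ∈ lh, ∃ kv ∈ rec, pvKw (pvStrip kv.1) = true) :
    infer_metrics lh none = infer_metrics_alt lh none := by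
  unfold infer_metrics infer_metrics_alt
  simp only [Option.getD_none, List.isEmpty_nil, if_true]
  simp only [show pvStripB = pvStrip from rfl, show pvKwB = pvKw from rfl,
    show pvCandidatesB = pvCandidates from rfl]
  -- candidate filters agree
  have hfilter :
      pvCandidates.filter (fun m =>
        lh.any (fun rec => rec.any (fun kv => kv.1 == m || kv.1 == pvEval m))) =
      pvCandidates.filter (fun c => PySem.Set.contains
        (lh.foldl (fun s rec => rec.foldl (fun s kv => PySem.Set.add s (pvStrip kv.1)) s) PySem.Set.empty) c) := by
    apply List.filter_congr
    intro m hm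
    have hmsw : PySem.Str.startswith m "eval_" = false := by
      fin_cases hm <;> decide
    have : (lh.any (fun rec => rec.any (fun kv => kv.1 == m || kv.1 == pvEval m)) = true) ↔
        (PySem.Set.contains
          (lh.foldl (fun s rec => rec.foldl (fun s kv => PySem.Set.add s (pvStrip kv.1)) s) PySem.Set.empty) m = true) := by
      rw [PySem.Set.contains_iff, mem_baseFold]
      simp only [List.any_eq_true, PySem.Set.empty, List.not_mem_nil, false_or]
      constructor
      · rintro ⟨rec, hrec, kv, hkv, h⟩
        exact ⟨rec, hrec, kv, hkv, (pvStrip_eq_iff kv.1 m hmsw).mp h⟩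
      · rintro ⟨rec, hrec, kv, hkv, h⟩
        exact ⟨rec, hrec, kv, hkv, (pvStrip_eq_iff kv.1 m hmsw).mpr h⟩
    exact Bool.coe_iff_coe.mp this
  rw [hfilter]
  -- the present branches now coincide; handle the inferred branch
  by_cases hp : PySem.Set.ofList (pvCandidates.filter (fun c => PySem.Set.contains
        (lh.foldl (fun s rec => rec.foldl (fun s kv => PySem.Set.add s (pvStrip kv.1)) s) PySem.Set.empty) c)) ≠ []
  · rw [if_pos hp, if_pos hp]
  · rw [if_neg hp, if_neg hp]
    obtain ⟨rec0, hrec0, kv0, hkv0, hkw0⟩ := hpre2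
    set IA := lh.foldl (fun s rec => rec.foldl (fun s kv =>
        let base := pvStrip kv.1
        if pvKw base then PySem.Set.add s base else s) s) PySem.Set.empty with hIA
    set BK := lh.foldl (fun s rec => rec.foldl (fun s kv => PySem.Set.add s (pvStrip kv.1)) s) PySem.Set.empty with hBK
    have memA : pvStrip kv0.1 ∈ IA := by
      rw [hIA, mem_condFold]
      exact Or.inr ⟨rec0, hrec0, kv0, hkv0, rfl, hkw0⟩
    have memB : pvStrip kv0.1 ∈ PySem.Set.ofList (List.filter pvKw BK) := by
      rw [PySem.Set.mem_ofList, List.mem_filter]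
      exact ⟨by rw [hBK, mem_baseFold]; exact Or.inr ⟨rec0, hrec0, kv0, hkv0, rfl⟩, hkw0⟩
    have hA : ¬ (IA = []) := by intro h; rw [h] at memA; exact List.not_mem_nil memA
    have hB : ¬ (PySem.Set.ofList (List.filter pvKw BK) = []) := by
      intro h; rw [h] at memB; exact List.not_mem_nil memB
    rw [if_neg hA, if_neg hB]
    apply PySem.List.sorted_eq_sorted_of_perm _ _ _ (fun _ _ h => h)
    apply (List.perm_ext_iff_of_nodup ?_ ?_).mpr
    · intro y
      rw [hIA, mem_condFold, PySem.Set.mem_ofList, List.mem_filter, hBK, mem_baseFold]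
      simp only [PySem.Set.empty, List.not_mem_nil, false_or]
      constructor
      · rintro ⟨rec, hrec, kv, hkv, heq, hkw⟩
        exact ⟨⟨rec, hrec, kv, hkv, heq⟩, hkw⟩
      · rintro ⟨⟨rec, hrec, kv, hkv, heq⟩, hkw⟩
        exact ⟨rec, hrec, kv, hkv, heq, hkw⟩
    · exact nodup_condFold lh _ List.nodup_nil
    · exact PySem.Set.nodup_ofList _

-- ===== VERDICT (by name: the statement is the Claim_ definition above) =====
theorem infer_metrics_spec : Claim_equal_infer_metrics := by
  intro lh ex _hdom hpre
  unfold Spec_infer_metrics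
  rcases ex with _ | (_ | ⟨x, xs⟩)
  · -- explicit = None
    rcases hpre with h | h
    · exact absurd rfl h
    · exact body_eq lh h
  · -- explicit = some []
    rcases hpre with h | h
    · exact absurd rfl h
    · exact body_eq lh h
  · -- explicit = some (x :: xs)
    rfl
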